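-- pv_equiv track=rewrite | github.com/gso-bench/scaffolds | openhands_gso/helpers.py | remove_binary_diffs
-- ===== SOURCE A (Python) =====
-- def remove_binary_diffs(patch_text: str) -> str:
--     """Remove binary file diffs from a git patch."""
--     lines = patch_text.splitlines()
--     cleaned_lines: list[str] = []
--     block: list[str] = []
--     is_binary_block = False
--
--     for line in lines:
--         if line.startswith("diff --git "):
--             if block and not is_binary_block:
--                 cleaned_lines.extend(block)
--             block = [line]
--             is_binary_block = False
--         elif "Binary files" in line:
--             is_binary_block = True
--             block.append(line)
--         else:
--             block.append(line)
--
--     if block and not is_binary_block: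
--         cleaned_lines.extend(block)
--     return "\n".join(cleaned_lines)
-- ===== SOURCE B (Python) =====
-- def remove_binary_diffs(patch_text: str) -> str:
--     """Remove binary file diffs from a git patch (group -> filter -> flatten)."""
--     blocks: list[list[str]] = [[]]
--     for line in patch_text.splitlines():
--         if line.startswith("diff --git "):
--             blocks.append([line])
--         else:
--             blocks[-1].append(line)
--     kept = [b for b in blocks if not any("Binary files" in l for l in b)]
--     return "\n".join(line for b in kept for line in b)
-- ===== Notes on version B (the rewrite author's own statement) =====
-- stated objective: simpler
-- what changed: Replaces A's streaming loop with a running is_binary flag and incremental emission by a group-then-filter-then-flatten pipeline: split lines into blocks at 'diff --git ' headers, keep blocks in which no line contains 'Binary files', flatten and join.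
-- outside the precondition, e.g. on remove_binary_diffs('diff --git Binary files\nx'): A returns 'diff --git Binary files\nx', B returns ''
import Mathlib
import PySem

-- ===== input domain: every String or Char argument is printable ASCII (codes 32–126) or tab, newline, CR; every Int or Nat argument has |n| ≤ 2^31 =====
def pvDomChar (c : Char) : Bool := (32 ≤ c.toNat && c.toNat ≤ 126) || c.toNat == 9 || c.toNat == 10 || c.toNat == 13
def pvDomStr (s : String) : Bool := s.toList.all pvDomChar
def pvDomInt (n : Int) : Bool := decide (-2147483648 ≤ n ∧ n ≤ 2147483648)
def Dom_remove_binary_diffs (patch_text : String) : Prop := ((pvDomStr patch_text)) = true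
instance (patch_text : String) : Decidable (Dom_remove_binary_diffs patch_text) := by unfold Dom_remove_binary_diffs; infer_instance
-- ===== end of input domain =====

-- B rewrites A's streaming flag-based loop as a group-blocks -> filter -> flatten pipeline (simpler decomposition, same cost).


-- ===== PORT A =====
-- the for-loop over lines with state (cleaned_lines, block, is_binary_block)
def pvAloop : List String → List String → List String → Bool → List String
  | [], cleaned, block, isBin =>
      if !block.isEmpty && !isBin then cleaned ++ block else cleaned
  | l :: ls, cleaned, block, isBin =>
      if PySem.Str.startswith l "diff --git " then
        pvAloop ls (if !block.isEmpty && !isBin then cleaned ++ block else cleaned) [l] false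
      else if PySem.Str.isIn "Binary files" l then
        pvAloop ls cleaned (block ++ [l]) true
      else
        pvAloop ls cleaned (block ++ [l]) isBin

def remove_binary_diffs (patch_text : String) : String :=
  PySem.Str.join "\n" (pvAloop (PySem.Str.splitlines patch_text) [] [] false)

-- ===== PORT B =====
-- grouping loop: append to the current (last) block, start a new block at each 'diff --git ' header
def pvBlocks : List String → List String → List (List String)
  | cur, [] => [cur]
  | cur, l :: ls =>
      if PySem.Str.startswith l "diff --git " then cur :: pvBlocks [l] ls
      else pvBlocks (cur ++ [l]) ls

def pvIsBinary (b : List String) : Bool := b.any (fun l => PySem.Str.isIn "Binary files" l)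

def remove_binary_diffs_alt (patch_text : String) : String :=
  PySem.Str.join "\n"
    (((pvBlocks [] (PySem.Str.splitlines patch_text)).filter (fun b => !pvIsBinary b)).flatten)

-- ===== PRECONDITION & SPEC =====
-- Pre_ excludes patches in which some line both starts with 'diff --git ' and contains 'Binary files':
-- on such malformed headers A classifies by the prefix first and keeps the block, while B's any-line scan
-- drops it — both readings are defensible, neither is specified.
def Pre_remove_binary_diffs (patch_text : String) : Prop :=
  ∀ l ∈ PySem.Str.splitlines patch_text,
    ¬(PySem.Str.startswith l "diff --git " = true ∧ PySem.Str.isIn "Binary files" l = true)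
instance (patch_text : String) : Decidable (Pre_remove_binary_diffs patch_text) := by
  unfold Pre_remove_binary_diffs; infer_instance

def pvWitness_remove_binary_diffs : String :=
  "diff --git a/x b/x\nBinary files a and b differ\ndiff --git a/y b/y\n+ok"

def Spec_remove_binary_diffs (patch_text : String) (out : String) : Prop := out = remove_binary_diffs_alt patch_text
instance (patch_text : String) (out : String) : Decidable (Spec_remove_binary_diffs patch_text out) := by unfold Spec_remove_binary_diffs; infer_instance

-- ===== CLAIM (what is proved, stated in full; the proofs are below) =====
def Claim_equal_remove_binary_diffs : Prop := ∀ (patch_text : String), Dom_remove_binary_diffs patch_text → Pre_remove_binary_diffs patch_text → Spec_remove_binary_diffs patch_text (remove_binary_diffs patch_text)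

-- ===== LEMMAS AND PROOFS =====

-- A's end-of-loop / header-time emission equals filtering the finished block.
lemma pvKeep_eq (cleaned cur : List String) (bin : Bool) (hbin : bin = pvIsBinary cur) :
    (if !cur.isEmpty && !bin then cleaned ++ cur else cleaned)
      = cleaned ++ (if pvIsBinary cur then [] else cur) := by
  subst hbin
  cases cur with
  | nil => simp [pvIsBinary]
  | cons a t =>
      cases h : pvIsBinary (a :: t)
      · simp [h]
      · simp

-- Main invariant: A's loop from state (cleaned, cur, isBinary cur) equals
-- cleaned ++ the filtered flattened blocks of (cur, remaining lines).
lemma pvLoop_eq (ls : List String) :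
    ∀ (cleaned cur : List String) (bin : Bool),
      (∀ l ∈ ls, ¬(PySem.Str.startswith l "diff --git " = true ∧ PySem.Str.isIn "Binary files" l = true)) →
      bin = pvIsBinary cur →
      pvAloop ls cleaned cur bin
        = cleaned ++ ((pvBlocks cur ls).filter (fun b => !pvIsBinary b)).flatten := by
  induction ls with
  | nil =>
      intro cleaned cur bin _ hbin
      simp only [pvAloop, pvBlocks, List.filter]
      rw [pvKeep_eq cleaned cur bin hbin]
      cases h : pvIsBinary cur
      · simp [h]
      · simp
  | cons l ls ih =>
      intro cleaned cur bin hpre hbin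
      have hl := hpre l (by simp)
      have hrest : ∀ x ∈ ls, ¬(PySem.Str.startswith x "diff --git " = true ∧ PySem.Str.isIn "Binary files" x = true) :=
        fun x hx => hpre x (by simp [hx])
      by_cases hd : PySem.Str.startswith l "diff --git " = true
      · have hnotbin : PySem.Str.isIn "Binary files" l = false := by
          cases h : PySem.Str.isIn "Binary files" l
          · rfl
          · exact absurd ⟨hd, h⟩ hl
        simp only [pvAloop, pvBlocks, hd, if_pos]
        rw [ih _ [l] false hrest
          (by simp only [pvIsBinary, List.any_cons, List.any_nil, hnotbin, Bool.or_false])]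
        rw [pvKeep_eq cleaned cur bin hbin]
        cases h : pvIsBinary cur <;> simp [h, List.append_assoc]
      · have hd' : PySem.Str.startswith l "diff --git " = false := by
          cases h : PySem.Str.startswith l "diff --git " <;> simp_all
        by_cases hb : PySem.Str.isIn "Binary files" l = true
        · simp only [pvAloop, pvBlocks, hd', hb, Bool.false_eq_true, if_false, if_pos]
          exact ih _ (cur ++ [l]) true hrest
            (by simp only [pvIsBinary, List.any_append, List.any_cons, List.any_nil, hb,
                  Bool.or_false, Bool.or_true])
        · have hb' : PySem.Str.isIn "Binary files" l = false := by
            cases h : PySem.Str.isIn "Binary files" l <;> simp_all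
          simp only [pvAloop, pvBlocks, hd', hb', Bool.false_eq_true, if_false]
          exact ih _ (cur ++ [l]) bin hrest
            (by simp only [pvIsBinary, List.any_append, List.any_cons, List.any_nil, hb',
                  Bool.or_false]; simpa [pvIsBinary] using hbin)

-- ===== VERDICT (by name: the statement is the Claim_ definition above) =====
theorem remove_binary_diffs_spec : Claim_equal_remove_binary_diffs := by
  intro patch_text _ hpre
  unfold Spec_remove_binary_diffs remove_binary_diffs remove_binary_diffs_alt
  rw [pvLoop_eq (PySem.Str.splitlines patch_text) [] [] false hpre (by simp [pvIsBinary])]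
  simp
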